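-- pv_equiv track=rewrite | github.com/mladenivkovic/mesh-hydro | py/module/hydro_plotting.py | get_figname
-- ===== SOURCE A (Python) =====
-- file_format = "png"
--
-- def get_figname(fname, case = None):
--     """
--     Generate figure name using initial filename fname.
--     Remove the file suffix, if present, and add a png.
--
--     if case is not None, it will add something to the file name
--     so it will be distinguishable.
--     Accepted cases:
--         "density":              for density-only plotting
--         "overplotted":          mutliple plots on one axis
--         "density-overplotted":  density only with multiple lines per axis
--
--     returns:
--         figname:    figure name string
--     """
--
--     # start from last letter, look for a dot to find the suffix
--     # if you reach a slash first, stop there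
--     nchars = len(fname)
--     dotindex = None
--     for c in range(nchars):
--         if fname[nchars-c-1] == '/':
--             break
--         if fname[nchars-c-1] == ".":
--             dotindex = nchars - c - 1
--             break
--
--     # now extract the actual file basename
--     if dotindex is None:
--         figname = fname
--     else:
--         figname = fname[:dotindex]
--
--     if case is not None:
--         if case == "density":
--             figname += "-density-only"
--         if case == "overplotted":
--             # first remove snapshot number
--             figname = figname[:-5]
--             figname += "-overplotted"
--         if case == "density-overplotted":
--             figname = figname[:-5]
--             figname += "-density-only-overplotted"
--         if case == "3D":
--             figname += "-3D"
--
--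
--     figname += "." + file_format
--
--     return figname
-- ===== SOURCE B (Python) =====
-- file_format = "png"
--
-- def get_figname(fname, case=None):
--     # idiomatic: locate suffix with two rfind lookups instead of a manual backward scan
--     dotpos = fname.rfind('.')
--     slashpos = fname.rfind('/')
--     figname = fname[:dotpos] if dotpos > slashpos else fname
--     if case == "density":
--         figname += "-density-only"
--     elif case == "overplotted":
--         figname = figname[:-5] + "-overplotted"
--     elif case == "density-overplotted":
--         figname = figname[:-5] + "-density-only-overplotted"
--     elif case == "3D":
--         figname += "-3D"
--     return figname + "." + file_format
-- ===== Notes on version B (the rewrite author's own statement) =====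
-- stated objective: idiomatic
-- what changed: The manual backward character scan with early break is replaced by two independent rfind lookups ('.' and '/') and a dotpos > slashpos comparison to decide whether to strip the suffix; the case cascade becomes an if/elif chain.
import Mathlib
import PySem

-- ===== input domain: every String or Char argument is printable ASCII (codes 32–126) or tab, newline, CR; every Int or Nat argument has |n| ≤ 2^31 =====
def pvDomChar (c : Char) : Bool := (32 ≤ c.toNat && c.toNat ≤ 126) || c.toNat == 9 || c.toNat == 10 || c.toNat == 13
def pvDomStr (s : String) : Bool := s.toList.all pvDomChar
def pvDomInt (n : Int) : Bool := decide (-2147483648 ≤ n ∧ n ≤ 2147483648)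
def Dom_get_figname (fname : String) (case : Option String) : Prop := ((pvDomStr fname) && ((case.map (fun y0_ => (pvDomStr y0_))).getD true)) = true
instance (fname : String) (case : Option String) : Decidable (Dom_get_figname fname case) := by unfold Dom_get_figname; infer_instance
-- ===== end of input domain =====

-- B replaces A's manual backward scan (break at '/' or '.') by two rfind lookups and a
-- dotpos > slashpos comparison; same case cascade as an if/elif chain (idiomatic, same cost).


-- ===== PORT A =====
-- A's backward scan: c = 0,1,… examines fname[nchars-c-1]; break at '/' (no dot) or '.' (record index).
-- cs.getD is exact here: the loop only reads indices n-c-1 with c < n, which are in range in Python.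
def pvAloop (cs : List Char) (n : Nat) (c : Nat) : Option Nat :=
  if _h : c < n then
    if cs.getD (n - c - 1) ' ' = '/' then none
    else if cs.getD (n - c - 1) ' ' = '.' then some (n - c - 1)
    else pvAloop cs n (c + 1)
  else none
termination_by n - c

def get_figname (fname : String) (case : Option String) : String :=
  let cs := fname.toList
  let nchars := cs.length
  let dotindex := pvAloop cs nchars 0
  let figname := match dotindex with
    | none => cs
    | some i => cs.take i          -- fname[:dotindex], dotindex ≥ 0: exact
  let figname := match case with
    | none => figname
    | some _ =>
      let figname := if case = some "density" then figname ++ "-density-only".toList else figname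
      -- figname[:-5] = take (len-5) (empty when len < 5): exact
      let figname := if case = some "overplotted" then (figname.take (figname.length - 5)) ++ "-overplotted".toList else figname
      let figname := if case = some "density-overplotted" then (figname.take (figname.length - 5)) ++ "-density-only-overplotted".toList else figname
      let figname := if case = some "3D" then figname ++ "-3D".toList else figname
      figname
  String.ofList (figname ++ ['.'] ++ "png".toList)

-- ===== PORT B =====
def get_figname_alt (fname : String) (case : Option String) : String :=
  let cs := fname.toList
  let dotpos := PySem.Chars.rfind cs ['.']
  let slashpos := PySem.Chars.rfind cs ['/']
  -- fname[:dotpos]: in the taken branch dotpos > slashpos ≥ -1, so dotpos ≥ 0 and take is exact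
  let figname := if dotpos > slashpos then cs.take dotpos.toNat else cs
  let figname :=
    if case = some "density" then figname ++ "-density-only".toList
    else if case = some "overplotted" then (figname.take (figname.length - 5)) ++ "-overplotted".toList
    else if case = some "density-overplotted" then (figname.take (figname.length - 5)) ++ "-density-only-overplotted".toList
    else if case = some "3D" then figname ++ "-3D".toList
    else figname
  String.ofList (figname ++ ['.'] ++ "png".toList)

-- ===== PRECONDITION & SPEC =====
def Spec_get_figname (fname : String) (case : Option String) (out : String) : Prop := out = get_figname_alt fname case
instance (fname : String) (case : Option String) (out : String) : Decidable (Spec_get_figname fname case out) := by unfold Spec_get_figname; infer_instance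

-- ===== CLAIM (what is proved, stated in full; the proofs are below) =====
def Claim_equal_get_figname : Prop := ∀ (fname : String) (case : Option String), Dom_get_figname fname case → Spec_get_figname fname case (get_figname fname case)

-- ===== LEMMAS AND PROOFS =====

-- highest index ≤ j at which ch occurs in cs (-1 if none): proof-side spec of rfind on a one-char needle
def pvRl (cs : List Char) (ch : Char) : Nat → Int
  | 0 => if cs[0]? = some ch then 0 else -1
  | j + 1 => if cs[j + 1]? = some ch then ((j + 1 : Nat) : Int) else pvRl cs ch j

theorem pvSingleton_isPrefixOf_drop (cs : List Char) (ch : Char) (j : Nat) :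
    [ch].isPrefixOf (cs.drop j) = true ↔ cs[j]? = some ch := by
  have h : (cs.drop j).head? = cs[j]? := List.head?_drop
  cases hd : cs.drop j with
  | nil =>
    rw [hd] at h; simp at h
    simp [List.isPrefixOf, List.getElem?_eq_none h]
  | cons a t =>
    rw [hd] at h; simp only [List.head?_cons] at h
    rw [← h]
    constructor
    · intro hp; rcases List.isPrefixOf_iff_prefix.mp hp with ⟨u, hu⟩; cases hu; rfl
    · intro he; simp only [Option.some.injEq] at he
      exact List.isPrefixOf_iff_prefix.mpr ⟨t, by simp [he]⟩

theorem pvGo_eq_rl (cs : List Char) (ch : Char) (j : Nat) :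
    PySem.Chars.rfind.go cs [ch] j = pvRl cs ch j := by
  induction j with
  | zero =>
    simp only [PySem.Chars.rfind.go, pvRl]
    rw [show cs = cs.drop 0 from rfl]
    by_cases hp : cs[0]? = some ((ch : Char))
    · rw [if_pos ((pvSingleton_isPrefixOf_drop cs ch 0).mpr (by simpa using hp)), if_pos (by simpa using hp)]
    · rw [if_neg (fun hc => hp (by simpa using (pvSingleton_isPrefixOf_drop cs ch 0).mp hc)), if_neg (by simpa using hp)]
  | succ j ih =>
    simp only [PySem.Chars.rfind.go, pvRl]
    by_cases hp : cs[j+1]? = some ch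
    · rw [if_pos ((pvSingleton_isPrefixOf_drop cs ch (j+1)).mpr hp), if_pos hp]
    · rw [if_neg (fun hc => hp ((pvSingleton_isPrefixOf_drop cs ch (j+1)).mp hc)), if_neg hp, ih]

theorem pvRl_le (cs : List Char) (ch : Char) (j : Nat) : pvRl cs ch j ≤ (j : Int) := by
  induction j with
  | zero => simp only [pvRl]; split <;> omega
  | succ j ih => simp only [pvRl]; split; · omega
                 · exact le_trans ih (by push_cast; omega)

theorem pvAloop_eq (cs : List Char) (j : Nat) (hj : j < cs.length) :
    pvAloop cs cs.length (cs.length - 1 - j) =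
      (if pvRl cs '/' j < pvRl cs '.' j then some (pvRl cs '.' j).toNat else none) := by
  induction j with
  | zero =>
    rw [pvAloop, dif_pos (by omega)]
    have hidx : cs.length - (cs.length - 1 - 0) - 1 = 0 := by omega
    rw [hidx, List.getD_eq_getElem cs ' ' (by omega)]
    have h0 : cs[0]? = some cs[0] := List.getElem?_eq_getElem (by omega)
    simp only [pvRl, h0, Option.some.injEq]
    split_ifs <;> simp_all
    have hlen : cs.length - 1 + 1 = cs.length := by omega
    rw [hlen, pvAloop, dif_neg (by omega)]
  | succ j ih =>
    rw [pvAloop, dif_pos (by omega)]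
    have hidx : cs.length - (cs.length - 1 - (j + 1)) - 1 = j + 1 := by omega
    rw [hidx, List.getD_eq_getElem cs ' ' (by omega)]
    have h1 : cs[j+1]? = some cs[j+1] := List.getElem?_eq_getElem (by omega)
    have hdle := pvRl_le cs '.' j
    have hsle := pvRl_le cs '/' j
    have hstep : cs.length - 1 - (j + 1) + 1 = cs.length - 1 - j := by omega
    rw [hstep]
    have ihj := ih (by omega)
    simp only [pvRl, h1, Option.some.injEq]
    split_ifs at * <;> simp_all <;> omega

theorem pvRfind_eq_rl_last (cs : List Char) (ch : Char) (h : 0 < cs.length) :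
    PySem.Chars.rfind cs [ch] = pvRl cs ch (cs.length - 1) := by
  show PySem.Chars.rfind.go cs [ch] cs.length = _
  rw [pvGo_eq_rl]
  have hn : cs.length = (cs.length - 1) + 1 := by omega
  rw [hn]
  have hnone : cs[(cs.length - 1) + 1]? = none := List.getElem?_eq_none (by omega)
  simp [pvRl, hnone]

theorem pvFig_eq (cs : List Char) :
    (match pvAloop cs cs.length 0 with
      | none => cs
      | some i => cs.take i) =
    (if PySem.Chars.rfind cs ['.'] > PySem.Chars.rfind cs ['/'] then cs.take (PySem.Chars.rfind cs ['.']).toNat else cs) := by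
  rcases Nat.eq_zero_or_pos cs.length with h0 | hpos
  · have hnil : cs = [] := List.length_eq_zero_iff.mp h0
    subst hnil
    rw [pvAloop, dif_neg (by omega)]
    simp [PySem.Chars.rfind, PySem.Chars.rfind.go, List.isPrefixOf]
  · have hA := pvAloop_eq cs (cs.length - 1) (by omega)
    rw [show cs.length - 1 - (cs.length - 1) = 0 by omega] at hA
    rw [hA, pvRfind_eq_rl_last cs '.' hpos, pvRfind_eq_rl_last cs '/' hpos]
    split_ifs <;> rfl

-- ===== VERDICT (by name: the statement is the Claim_ definition above) =====
theorem get_figname_spec : Claim_equal_get_figname := by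
  intro fname case _
  unfold Spec_get_figname
  simp only [get_figname, get_figname_alt]
  rw [pvFig_eq fname.toList]
  cases case with
  | none => simp
  | some c => split_ifs <;> simp_all
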